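-- pv_equiv track=rewrite | github.com/zhulf0804/Coding.Python | leetcode/491_递增子序列.py | findSubsequences
-- ===== SOURCE A (Python) =====
-- from typing import List
--
-- def findSubsequences(nums: List[int]) -> List[List[int]]:
--     res = []
--     def helper(nums, cur):
--         if not nums:
--             if len(cur) >= 2:
--                 res.append(cur)
--             return
--         if not cur:
--             helper(nums[1:], cur + [nums[0]])
--             helper(nums[1:], cur)
--         else:
--             if nums[0] >= cur[-1]:
--                 helper(nums[1:], cur + [nums[0]])
--             helper(nums[1:], cur)
--     helper(nums, [])
--     return list(set(tuple(t) for t in res))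
-- ===== SOURCE B (Python) =====
-- from typing import List
--
--
-- def findSubsequences(nums: List[int]) -> List[List[int]]:
--     # Backtracking with a per-level used set: each distinct increasing
--     # subsequence is generated exactly once (no post-hoc dedup pass).
--     res = []
--
--     def backtrack(rest, cur):
--         used = set()
--         for i, v in enumerate(rest):
--             if v not in used and (not cur or v >= cur[-1]):
--                 used.add(v)
--                 backtrack(rest[i + 1:], cur + [v])
--         if len(cur) >= 2:
--             res.append(tuple(cur))
--
--     backtrack(nums, [])
--     return res
-- ===== Notes on version B (the rewrite author's own statement) =====
-- stated objective: alternative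
-- what changed: A enumerates all 2^n include/exclude paths and deduplicates afterwards with set(); B backtracks with a per-level used-value set so every distinct increasing subsequence is generated exactly once and no dedup pass is needed (much less work on duplicate-heavy inputs, but the output itself can be exponential, so not measurably faster on random inputs).
import Mathlib
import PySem

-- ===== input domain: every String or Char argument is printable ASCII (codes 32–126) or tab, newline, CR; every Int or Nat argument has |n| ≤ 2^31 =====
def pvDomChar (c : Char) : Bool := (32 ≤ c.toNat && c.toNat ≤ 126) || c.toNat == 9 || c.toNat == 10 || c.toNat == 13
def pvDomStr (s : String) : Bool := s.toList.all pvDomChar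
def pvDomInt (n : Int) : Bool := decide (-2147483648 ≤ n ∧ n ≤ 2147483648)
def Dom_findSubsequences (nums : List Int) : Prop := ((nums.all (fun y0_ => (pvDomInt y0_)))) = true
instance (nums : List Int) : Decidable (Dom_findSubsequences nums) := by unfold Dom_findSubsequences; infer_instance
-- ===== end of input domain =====

-- B replaces A's exhaustive 2^n include/exclude enumeration + set() dedup by duplicate-free
-- backtracking with a per-level used-value set, so no dedup pass is needed (objective: alternative).
-- Note on `list(set(...))`: Python's set-iteration order is an unmodelled hash artefact; the
-- port renders it as first-insertion order (the task compares this return value as a set).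

-- ===== PORT A =====
-- res accumulated by A's nested helper, returned instead of mutated; include branch first, then exclude.
def pvHelperA (xs cur : List Int) : List (List Int) :=
  match xs with
  | [] => if 2 ≤ cur.length then [cur] else []
  | x :: rest =>
    if cur.isEmpty then
      pvHelperA rest (cur ++ [x]) ++ pvHelperA rest cur
    else
      (if cur.getLastD 0 ≤ x then pvHelperA rest (cur ++ [x]) else []) ++ pvHelperA rest cur

def findSubsequences (nums : List Int) : List (List Int) :=
  PySem.Set.ofList (pvHelperA nums [])

-- ===== PORT B =====
-- pvLoopB is B's `for i, v in enumerate(rest)` with the per-level used set; pvBtB is `backtrack`.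
mutual
def pvLoopB (rest cur : List Int) (used : PySem.Set Int) : List (List Int) :=
  match rest with
  | [] => []
  | v :: rs =>
    if !(PySem.Set.contains used v) && (cur.isEmpty || decide (cur.getLastD 0 ≤ v)) then
      pvBtB rs (cur ++ [v]) ++ pvLoopB rs cur (PySem.Set.add used v)
    else
      pvLoopB rs cur used
  termination_by (rest.length, 0)

def pvBtB (rest cur : List Int) : List (List Int) :=
  pvLoopB rest cur PySem.Set.empty ++ (if 2 ≤ cur.length then [cur] else [])
  termination_by (rest.length, 1)
end

def findSubsequences_alt (nums : List Int) : List (List Int) :=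
  pvBtB nums []

-- ===== PRECONDITION & SPEC =====
def Spec_findSubsequences (nums : List Int) (out : List (List Int)) : Prop := out = findSubsequences_alt nums
instance (nums : List Int) (out : List (List Int)) : Decidable (Spec_findSubsequences nums out) := by unfold Spec_findSubsequences; infer_instance

-- ===== CLAIM (what is proved, stated in full; the proofs are below) =====
def Claim_equal_findSubsequences : Prop := ∀ (nums : List Int), Dom_findSubsequences nums → Spec_findSubsequences nums (findSubsequences nums)

-- ===== LEMMAS AND PROOFS =====

-- the common extension condition (A's two branches, B's value test)
def pvOk (cur : List Int) (v : Int) : Bool := cur.isEmpty || decide (cur.getLastD 0 ≤ v)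

theorem pvHelperA_cons (x : Int) (rest cur : List Int) :
    pvHelperA (x :: rest) cur =
      (if pvOk cur x then pvHelperA rest (cur ++ [x]) else []) ++ pvHelperA rest cur := by
  by_cases h : cur.isEmpty <;> simp [pvHelperA, pvOk, h]

theorem pvLoopB_cons (v : Int) (rs cur : List Int) (used : PySem.Set Int) :
    pvLoopB (v :: rs) cur used =
      if !(PySem.Set.contains used v) && pvOk cur v then
        pvBtB rs (cur ++ [v]) ++ pvLoopB rs cur (PySem.Set.add used v)
      else
        pvLoopB rs cur used := by
  simp [pvLoopB, pvOk]

-- every output of A's helper extends cur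
theorem pvPrefA (xs : List Int) : ∀ cur t, t ∈ pvHelperA xs cur → cur <+: t := by
  induction xs with
  | nil =>
    intro cur t h
    simp only [pvHelperA] at h
    split at h <;> simp_all
  | cons x rest ih =>
    intro cur t h
    rw [pvHelperA_cons] at h
    rcases List.mem_append.1 h with h1 | h2
    · split at h1
      · exact (List.prefix_append cur [x]).trans (ih _ _ h1)
      · simp at h1
    · exact ih _ _ h2

theorem pvSuffixMono (ys : List Int) : ∀ xs cur t, xs <:+ ys → t ∈ pvHelperA xs cur → t ∈ pvHelperA ys cur := by
  induction ys with
  | nil => intro xs cur t h hm; rw [List.suffix_nil.1 h] at hm; exact hm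
  | cons y ys ih =>
    intro xs cur t h hm
    rcases List.suffix_cons_iff.1 h with rfl | h'
    · exact hm
    · rw [pvHelperA_cons]
      exact List.mem_append.2 (Or.inr (ih _ _ _ h' hm))

theorem pvSelfMem (xs : List Int) : ∀ cur, 2 ≤ cur.length → cur ∈ pvHelperA xs cur := by
  induction xs with
  | nil => intro cur h; simp [pvHelperA, h]
  | cons x rest ih =>
    intro cur h
    rw [pvHelperA_cons]
    exact List.mem_append.2 (Or.inr (ih _ h))
theorem pvPrefLoop (rs : List Int) : ∀ cur used t, t ∈ pvLoopB rs cur used → cur <+: t := by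
  induction rs with
  | nil => intro cur used t h; simp [pvLoopB] at h
  | cons v rs ih =>
    intro cur used t h
    rw [pvLoopB_cons] at h
    split at h
    · rcases List.mem_append.1 h with h1 | h2
      · rw [pvBtB] at h1
        rcases List.mem_append.1 h1 with h3 | h4
        · exact (List.prefix_append cur [v]).trans (ih _ _ _ h3)
        · split at h4 <;> simp_all
      · exact ih _ _ _ h2
    · exact ih _ _ _ h

theorem pvPrefBt (rs cur : List Int) (t : List Int) (h : t ∈ pvBtB rs cur) : cur <+: t := by
  rw [pvBtB] at h
  rcases List.mem_append.1 h with h1 | h2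
  · exact pvPrefLoop _ _ _ _ h1
  · split at h2 <;> simp_all

theorem pvLoopSub (rs : List Int) : ∀ cur used t, t ∈ pvLoopB rs cur used → t ∈ pvHelperA rs cur := by
  induction rs with
  | nil => intro cur used t h; simp [pvLoopB] at h
  | cons v rs ih =>
    intro cur used t h
    rw [pvLoopB_cons] at h
    rw [pvHelperA_cons]
    split at h
    · rename_i hc
      have hok : pvOk cur v = true := by
        simp only [Bool.and_eq_true] at hc; exact hc.2
      rcases List.mem_append.1 h with h1 | h2
      · rw [pvBtB] at h1
        refine List.mem_append.2 (Or.inl ?_)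
        rw [hok, if_pos rfl]
        rcases List.mem_append.1 h1 with h3 | h4
        · exact ih _ _ _ h3
        · obtain ⟨rfl, hl⟩ : t = cur ++ [v] ∧ 2 ≤ (cur ++ [v]).length := by
            split at h4 <;> simp_all
          exact pvSelfMem rs _ hl
      · exact List.mem_append.2 (Or.inr (ih _ _ _ h2))
    · exact List.mem_append.2 (Or.inr (ih _ _ _ h))

theorem pvBtSub (rs cur : List Int) (t : List Int) (h : t ∈ pvBtB rs cur) : t ∈ pvHelperA rs cur := by
  rw [pvBtB] at h
  rcases List.mem_append.1 h with h1 | h2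
  · exact pvLoopSub _ _ _ _ h1
  · obtain ⟨rfl, hl⟩ : t = cur ∧ 2 ≤ cur.length := by split at h2 <;> simp_all
    exact pvSelfMem rs _ hl

theorem pvPrefEq (cur t : List Int) (a b : Int) (ha : cur ++ [a] <+: t) (hb : cur ++ [b] <+: t) : a = b := by
  rcases List.prefix_or_prefix_of_prefix ha hb with h | h
  · have := List.IsPrefix.eq_of_length h (by simp)
    simpa using List.append_cancel_left this
  · have := List.IsPrefix.eq_of_length h (by simp)
    simpa using (List.append_cancel_left this).symm
theorem pvAddMem (S : PySem.Set Int) (a : Int) (v : Int) : v ∈ PySem.Set.add S a ↔ v ∈ S ∨ v = a := by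
  by_cases h : a ∈ S <;> simp [PySem.Set.add, h]
  rintro rfl; exact h

theorem pvSetUpdate (L : List (List Int)) : ∀ S : List (List Int),
    L.foldl PySem.Set.add S = S ++ (PySem.Set.ofList L).filter (fun t => !(S.contains t)) := by
  induction L with
  | nil => intro S; simp [PySem.Set.ofList]
  | cons a L ih =>
    intro S
    have hof : PySem.Set.ofList (a :: L) = a :: (PySem.Set.ofList L).filter (fun t => !([a].contains t)) := by
      calc PySem.Set.ofList (a :: L) = L.foldl PySem.Set.add [a] := by
             rw [PySem.Set.ofList_eq_foldl]; rfl
        _ = [a] ++ (PySem.Set.ofList L).filter (fun t => !([a].contains t)) := ih [a]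
        _ = a :: (PySem.Set.ofList L).filter (fun t => !([a].contains t)) := rfl
    show L.foldl PySem.Set.add (PySem.Set.add S a) = _
    rw [ih (PySem.Set.add S a), hof]
    by_cases hmem : a ∈ S
    · have hadd : PySem.Set.add S a = S := by simp [PySem.Set.add, hmem]
      rw [hadd, List.filter_cons]
      have : (!S.contains a) = false := by simp [hmem]
      rw [this]
      simp only [List.filter_filter]
      congr 1
      apply List.filter_congr
      intro t ht
      by_cases hta : t = a <;> simp [hta, hmem]
    · have hadd : PySem.Set.add S a = S ++ [a] := by simp [PySem.Set.add, hmem]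
      rw [hadd, List.filter_cons]
      have : (!S.contains a) = true := by simp [hmem]
      rw [this]
      simp only [List.filter_filter, List.append_assoc, List.cons_append, List.nil_append]
      congr 2
      apply List.filter_congr
      intro t ht
      by_cases hta : t = a <;> simp [hta, hmem]
theorem pvContainsEq (S : PySem.Set Int) (v : Int) : PySem.Set.contains S v = decide (v ∈ S) := by
  simp [pysem]

theorem pvContainsEqL (L : List (List Int)) (t : List Int) : L.contains t = decide (t ∈ L) := by
  simp

theorem pvLoopFilter (rs : List Int) : ∀ (cur : List Int) (x : Int) (U U' : PySem.Set Int) (rest : List Int),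
    rs <:+ rest → pvOk cur x = true → (∀ v : Int, v ∈ U' ↔ v ∈ U ∨ v = x) →
    (pvLoopB rs cur U).filter (fun t => !((pvHelperA rest (cur ++ [x])).contains t)) =
      pvLoopB rs cur U' := by
  induction rs with
  | nil => intro cur x U U' rest _ _ _; simp [pvLoopB]
  | cons w rs ih =>
    intro cur x U U' rest hsuf hok hUU
    have hsuf' : rs <:+ rest := (List.suffix_cons w rs).trans hsuf
    rw [pvLoopB_cons, pvLoopB_cons, pvContainsEq, pvContainsEq]
    by_cases hw : w = x
    · subst hw
      by_cases hwU : w ∈ U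
      · have hwU' : w ∈ U' := (hUU w).2 (Or.inl hwU)
        simp only [hwU, hwU', decide_true, Bool.not_true, Bool.false_and]
        exact ih cur w U U' rest hsuf' hok hUU
      · have hwU' : w ∈ U' := (hUU w).2 (Or.inr rfl)
        simp only [hwU, hwU', decide_true, decide_false, Bool.not_true, Bool.not_false,
          Bool.true_and, Bool.false_and, hok, if_true]
        rw [List.filter_append]
        have h1 : (pvBtB rs (cur ++ [w])).filter
            (fun t => !((pvHelperA rest (cur ++ [w])).contains t)) = [] := by
          rw [List.filter_eq_nil_iff]
          intro t ht
          have : t ∈ pvHelperA rest (cur ++ [w]) :=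
            pvSuffixMono rest rs _ t hsuf' (pvBtSub rs _ t ht)
          simp [this]
        rw [h1, List.nil_append]
        refine ih cur w (PySem.Set.add U w) U' rest hsuf' hok ?_
        intro v
        rw [hUU v, pvAddMem]
        tauto
    · by_cases hwU : w ∈ U
      · have hwU' : w ∈ U' := (hUU w).2 (Or.inl hwU)
        simp only [hwU, hwU', decide_true, Bool.not_true, Bool.false_and]
        exact ih cur x U U' rest hsuf' hok hUU
      · have hwU' : w ∉ U' := by
          intro h; rcases (hUU w).1 h with h' | h' <;> [exact hwU h'; exact hw h']
        by_cases hokw : pvOk cur w = true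
        · simp only [hwU, hwU', decide_false, Bool.not_false, Bool.true_and, hokw, if_true]
          rw [List.filter_append]
          have h1 : (pvBtB rs (cur ++ [w])).filter
              (fun t => !((pvHelperA rest (cur ++ [x])).contains t)) = pvBtB rs (cur ++ [w]) := by
            rw [List.filter_eq_self]
            intro t ht
            have hpw : cur ++ [w] <+: t := pvPrefBt rs _ t ht
            suffices h : t ∉ pvHelperA rest (cur ++ [x]) by simp [h]
            intro hmem
            exact hw (pvPrefEq cur t w x hpw (pvPrefA rest _ t hmem))
          rw [h1]
          congr 1
          refine ih cur x (PySem.Set.add U w) (PySem.Set.add U' w) rest hsuf' hok ?_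
          intro v
          rw [pvAddMem, pvAddMem, hUU v]
          tauto
        · simp only [hwU, hwU', decide_false, Bool.not_false, Bool.true_and, hokw]
          exact ih cur x U U' rest hsuf' hok hUU
theorem pvMain (xs : List Int) : ∀ cur, PySem.Set.ofList (pvHelperA xs cur) = pvBtB xs cur := by
  induction xs with
  | nil =>
    intro cur
    simp only [pvHelperA, pvBtB, pvLoopB, List.nil_append]
    split <;> simp [PySem.Set.ofList]
  | cons x xs ih =>
    intro cur
    rw [pvHelperA_cons, pvBtB, pvLoopB_cons, pvContainsEq]
    have hemp : (x ∈ (PySem.Set.empty : PySem.Set Int)) = False := by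
      simp [PySem.Set.empty]
    by_cases hok : pvOk cur x = true
    · rw [if_pos hok]
      simp only [hemp, decide_false, Bool.not_false, Bool.true_and, hok, if_true]
      rw [PySem.Set.ofList_eq_foldl, List.foldl_append, ← PySem.Set.ofList_eq_foldl,
        pvSetUpdate]
      have hpred : (PySem.Set.ofList (pvHelperA xs cur)).filter
            (fun t => !(List.contains (PySem.Set.ofList (pvHelperA xs (cur ++ [x]))) t)) =
          (PySem.Set.ofList (pvHelperA xs cur)).filter
            (fun t => !((pvHelperA xs (cur ++ [x])).contains t)) := by
        apply List.filter_congr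
        intro t ht
        have hm : t ∈ PySem.Set.ofList (pvHelperA xs (cur ++ [x])) ↔
            t ∈ pvHelperA xs (cur ++ [x]) := PySem.Set.mem_ofList _ _
        simp only [pvContainsEqL]
        by_cases h : t ∈ pvHelperA xs (cur ++ [x]) <;> simp [h, hm.2]
      have hfilt : (pvBtB xs cur).filter
            (fun t => !((pvHelperA xs (cur ++ [x])).contains t)) =
          pvLoopB xs cur (PySem.Set.add PySem.Set.empty x) ++
            (if 2 ≤ cur.length then [cur] else []) := by
        rw [pvBtB, List.filter_append]
        congr 1
        · refine pvLoopFilter xs cur x _ _ xs (List.suffix_refl xs) hok ?_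
          intro v
          simp [PySem.Set.empty]
        · split
          · have hnm : cur ∉ pvHelperA xs (cur ++ [x]) := by
              intro hmem
              have hp := List.IsPrefix.length_le (pvPrefA xs _ cur hmem)
              simp at hp
            simp [hnm]
          · rfl
      rw [hpred, ih cur, hfilt, ih (cur ++ [x])]
      simp [List.append_assoc]
    · have hok' : pvOk cur x = false := by simp_all
      simp only [hok', Bool.and_false, Bool.false_eq_true, if_false, List.nil_append]
      rw [ih cur, pvBtB]

-- ===== VERDICT (by name: the statement is the Claim_ definition above) =====
theorem findSubsequences_spec : Claim_equal_findSubsequences := by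
  intro nums _
  show findSubsequences nums = findSubsequences_alt nums
  exact pvMain nums []
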